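-- pv_equiv track=rewrite | github.com/apollo-game-org/apollo-cocos-creator-restore | spine.py | decode_uuid
-- ===== SOURCE A (Python) =====
-- i = [64,64,64,64,64,64,64,64,64,64,64,64,64,64,64,64,64,64,64,64,64,64,64,64,64,64,64,64,64,64,64,64,64,64,64,64,64,64,64,64,64,64,64,62,64,64,64,63,52,53,54,55,56,57,58,59,60,61,64,64,64,64,64,64,64,0,1,2,3,4,5,6,7,8,9,10,11,12,13,14,15,16,17,18,19,20,21,22,23,24,25,64,64,64,64,64,64,26,27,28,29,30,31,32,33,34,35,36,37,38,39,40,41,42,43,44,45,46,47,48,49,50,51]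
--
-- a = ["", "", "", "", "", "", "", "", "-", "", "", "", "", "-", "", "", "", "", "-", "", "", "", "", "-", "", "", "", "", "", "", "", "", "", "", "", ""]
--
-- n = '0123456789abcdef'
--
-- s = [0, 1, 2, 3, 4, 5, 6, 7, 9, 10, 11, 12, 14, 15, 16, 17, 19, 20, 21, 22, 24, 25, 26, 27, 28, 29, 30, 31, 32, 33, 34, 35]
--
-- def decode_uuid(t):
--     if len(t) != 22:
--         return t
--
--     a[0] = t[0]
--     a[1] = t[1]
--     r = 2
--     for e in range(2, 22, 2):
--         o = i[ord(t[e])]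
--         l = i[ord(t[e + 1])]
--         a[s[r]] = n[o >> 2]
--         a[s[r + 1]] = n[(3 & o) << 2 | l >> 4]
--         a[s[r + 2]] = n[15 & l]
--         r += 3
--
--     return ''.join(a)
-- ===== SOURCE B (Python) =====
-- i = [64,64,64,64,64,64,64,64,64,64,64,64,64,64,64,64,64,64,64,64,64,64,64,64,64,64,64,64,64,64,64,64,64,64,64,64,64,64,64,64,64,64,64,62,64,64,64,63,52,53,54,55,56,57,58,59,60,61,64,64,64,64,64,64,64,0,1,2,3,4,5,6,7,8,9,10,11,12,13,14,15,16,17,18,19,20,21,22,23,24,25,64,64,64,64,64,64,26,27,28,29,30,31,32,33,34,35,36,37,38,39,40,41,42,43,44,45,46,47,48,49,50,51]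
--
-- n = '0123456789abcdef'
--
-- def decode_uuid(t):
--     if len(t) != 22:
--         return t
--     h = t[0] + t[1]
--     for e in range(2, 22, 2):
--         o = i[ord(t[e])]
--         l = i[ord(t[e + 1])]
--         h += n[o >> 2] + n[(3 & o) << 2 | l >> 4] + n[15 & l]
--     return h[:8] + '-' + h[8:12] + '-' + h[12:16] + '-' + h[16:20] + '-' + h[20:]
-- ===== Notes on version B (the rewrite author's own statement) =====
-- stated objective: simpler
-- what changed: Replaces A's scatter-writes into a pre-dashed global template list via the index table s by a sequential append-only hex build followed by slice-and-join assembly, dropping the s table and the template (and the mutation of the module-level list a).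
import Mathlib
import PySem

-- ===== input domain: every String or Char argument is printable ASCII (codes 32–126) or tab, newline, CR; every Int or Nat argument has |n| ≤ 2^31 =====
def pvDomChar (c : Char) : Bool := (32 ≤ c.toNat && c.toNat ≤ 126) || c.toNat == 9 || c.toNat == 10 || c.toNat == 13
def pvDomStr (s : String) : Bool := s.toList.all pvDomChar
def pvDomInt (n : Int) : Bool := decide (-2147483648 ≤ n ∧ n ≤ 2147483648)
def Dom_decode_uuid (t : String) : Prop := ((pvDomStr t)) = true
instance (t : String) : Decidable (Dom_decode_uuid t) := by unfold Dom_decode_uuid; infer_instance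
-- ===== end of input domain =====

-- B replaces A's scatter-write into a pre-dashed global template (via the index table `s`) by a
-- sequential hex build plus slicing — simpler decomposition, same values; A also mutates the module-
-- level list `a` in place (a side effect, not the return value, which is what is proved equal here).

-- ===== PORT A =====
def pvITable : List Nat := [64,64,64,64,64,64,64,64,64,64,64,64,64,64,64,64,64,64,64,64,64,64,64,64,64,64,64,64,64,64,64,64,64,64,64,64,64,64,64,64,64,64,64,62,64,64,64,63,52,53,54,55,56,57,58,59,60,61,64,64,64,64,64,64,64,0,1,2,3,4,5,6,7,8,9,10,11,12,13,14,15,16,17,18,19,20,21,22,23,24,25,64,64,64,64,64,64,26,27,28,29,30,31,32,33,34,35,36,37,38,39,40,41,42,43,44,45,46,47,48,49,50,51]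
def pvNTable : List Char := ['0', '1', '2', '3', '4', '5', '6', '7', '8', '9', 'a', 'b', 'c', 'd', 'e', 'f']
def pvSTable : List Int := [0, 1, 2, 3, 4, 5, 6, 7, 9, 10, 11, 12, 14, 15, 16, 17, 19, 20, 21, 22, 24, 25, 26, 27, 28, 29, 30, 31, 32, 33, 34, 35]
def pvTemplate : List (List Char) := [[], [], [], [], [], [], [], [], ['-'], [], [], [], [], ['-'], [], [], [], [], ['-'], [], [], [], [], ['-'], [], [], [], [], [], [], [], [], [], [], [], []]

-- ''.join over a list of strings ported by hand as flatten + ofList (exact for these ASCII strings)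
def decode_uuid (t : String) : String :=
  let cs := t.toList
  if cs.length ≠ 22 then t
  else
    let a0 := PySem.List.pySetD (PySem.List.pySetD pvTemplate 0 [PySem.List.pyGetD cs 0 ' ']) 1
                [PySem.List.pyGetD cs 1 ' ']
    let st := (PySem.List.pyRange 2 22 2).foldl (fun (st : List (List Char) × Int) e =>
      let o := PySem.List.pyGetD pvITable ((PySem.List.pyGetD cs e ' ').toNat : Int) 64
      let l := PySem.List.pyGetD pvITable ((PySem.List.pyGetD cs (e + 1) ' ').toNat : Int) 64
      let a1 := PySem.List.pySetD st.1 (PySem.List.pyGetD pvSTable st.2 0)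
                  [PySem.List.pyGetD pvNTable ((o >>> 2 : Nat) : Int) '0']
      let a2 := PySem.List.pySetD a1 (PySem.List.pyGetD pvSTable (st.2 + 1) 0)
                  [PySem.List.pyGetD pvNTable (((3 &&& o) <<< 2 ||| l >>> 4 : Nat) : Int) '0']
      let a3 := PySem.List.pySetD a2 (PySem.List.pyGetD pvSTable (st.2 + 2) 0)
                  [PySem.List.pyGetD pvNTable ((15 &&& l : Nat) : Int) '0']
      (a3, st.2 + 3)) (a0, (2 : Int))
    String.ofList st.1.flatten

-- ===== PORT B =====
def decode_uuid_alt (t : String) : String :=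
  let cs := t.toList
  if cs.length ≠ 22 then t
  else
    let h := (PySem.List.pyRange 2 22 2).foldl (fun (h : List Char) e =>
      let o := PySem.List.pyGetD pvITable ((PySem.List.pyGetD cs e ' ').toNat : Int) 64
      let l := PySem.List.pyGetD pvITable ((PySem.List.pyGetD cs (e + 1) ' ').toNat : Int) 64
      h ++ [PySem.List.pyGetD pvNTable ((o >>> 2 : Nat) : Int) '0',
            PySem.List.pyGetD pvNTable (((3 &&& o) <<< 2 ||| l >>> 4 : Nat) : Int) '0',
            PySem.List.pyGetD pvNTable ((15 &&& l : Nat) : Int) '0'])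
      [PySem.List.pyGetD cs 0 ' ', PySem.List.pyGetD cs 1 ' ']
    String.ofList (PySem.List.slice h none (some 8) ++ ['-'] ++
      PySem.List.slice h (some 8) (some 12) ++ ['-'] ++
      PySem.List.slice h (some 12) (some 16) ++ ['-'] ++
      PySem.List.slice h (some 16) (some 20) ++ ['-'] ++
      PySem.List.slice h (some 20) none)

-- ===== PRECONDITION & SPEC =====
-- Pre_ excludes exactly the inputs where the Python A raises IndexError: a 22-char string whose
-- body (positions 2..21) has a char with code > 122, or whose even body position holds a char
-- outside the base64 alphabet (i-value 64, so n[16] is out of range).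
def Pre_decode_uuid (t : String) : Prop :=
  t.toList.length = 22 →
  ∀ k ∈ List.range 10,
    (t.toList.getD (2 + 2 * k) 'A').toNat ≤ 122 ∧
    pvITable.getD (t.toList.getD (2 + 2 * k) 'A').toNat 64 ≠ 64 ∧
    (t.toList.getD (3 + 2 * k) 'A').toNat ≤ 122
instance (t : String) : Decidable (Pre_decode_uuid t) := by unfold Pre_decode_uuid; infer_instance

def pvWitness_decode_uuid : String := "fcmR3XB9xLVqe2y6U8nq5d"

def Spec_decode_uuid (t : String) (out : String) : Prop := out = decode_uuid_alt t
instance (t : String) (out : String) : Decidable (Spec_decode_uuid t out) := by unfold Spec_decode_uuid; infer_instance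

-- ===== CLAIM (what is proved, stated in full; the proofs are below) =====
def Claim_equal_decode_uuid : Prop := ∀ (t : String), Dom_decode_uuid t → Pre_decode_uuid t → Spec_decode_uuid t (decode_uuid t)

-- ===== LEMMAS AND PROOFS =====
lemma pv_len22 (cs : List Char) (h : cs.length = 22) :
    ∃ c0 c1 c2 c3 c4 c5 c6 c7 c8 c9 c10 c11 c12 c13 c14 c15 c16 c17 c18 c19 c20 c21,
      cs = [c0, c1, c2, c3, c4, c5, c6, c7, c8, c9, c10, c11, c12, c13, c14, c15, c16, c17, c18, c19, c20, c21] := by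
  match cs, h with
  | [c0, c1, c2, c3, c4, c5, c6, c7, c8, c9, c10, c11, c12, c13, c14, c15, c16, c17, c18, c19, c20, c21], _ =>
    exact ⟨c0, c1, c2, c3, c4, c5, c6, c7, c8, c9, c10, c11, c12, c13, c14, c15, c16, c17, c18, c19, c20, c21, rfl⟩

-- ===== VERDICT (by name: the statement is the Claim_ definition above) =====
set_option maxRecDepth 20000 in
set_option maxHeartbeats 1000000 in
theorem decode_uuid_spec : Claim_equal_decode_uuid := by
  unfold Claim_equal_decode_uuid
  intro t _ _
  unfold Spec_decode_uuid
  by_cases h : t.toList.length = 22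
  · obtain ⟨c0, c1, c2, c3, c4, c5, c6, c7, c8, c9, c10, c11, c12, c13, c14, c15, c16, c17, c18, c19, c20, c21, hcs⟩ := pv_len22 _ h
    have hr : PySem.List.pyRange 2 22 2 = [2, 4, 6, 8, 10, 12, 14, 16, 18, 20] := by decide
    have hg0 : PySem.List.pyGetD [c0, c1, c2, c3, c4, c5, c6, c7, c8, c9, c10, c11, c12, c13, c14, c15, c16, c17, c18, c19, c20, c21] ((0 : Int)) ' ' = c0 := rfl
    have hg1 : PySem.List.pyGetD [c0, c1, c2, c3, c4, c5, c6, c7, c8, c9, c10, c11, c12, c13, c14, c15, c16, c17, c18, c19, c20, c21] ((1 : Int)) ' ' = c1 := rfl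
    have hg2 : PySem.List.pyGetD [c0, c1, c2, c3, c4, c5, c6, c7, c8, c9, c10, c11, c12, c13, c14, c15, c16, c17, c18, c19, c20, c21] ((2 : Int)) ' ' = c2 := rfl
    have hg4 : PySem.List.pyGetD [c0, c1, c2, c3, c4, c5, c6, c7, c8, c9, c10, c11, c12, c13, c14, c15, c16, c17, c18, c19, c20, c21] ((4 : Int)) ' ' = c4 := rfl
    have hg6 : PySem.List.pyGetD [c0, c1, c2, c3, c4, c5, c6, c7, c8, c9, c10, c11, c12, c13, c14, c15, c16, c17, c18, c19, c20, c21] ((6 : Int)) ' ' = c6 := rfl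
    have hg8 : PySem.List.pyGetD [c0, c1, c2, c3, c4, c5, c6, c7, c8, c9, c10, c11, c12, c13, c14, c15, c16, c17, c18, c19, c20, c21] ((8 : Int)) ' ' = c8 := rfl
    have hg10 : PySem.List.pyGetD [c0, c1, c2, c3, c4, c5, c6, c7, c8, c9, c10, c11, c12, c13, c14, c15, c16, c17, c18, c19, c20, c21] ((10 : Int)) ' ' = c10 := rfl
    have hg12 : PySem.List.pyGetD [c0, c1, c2, c3, c4, c5, c6, c7, c8, c9, c10, c11, c12, c13, c14, c15, c16, c17, c18, c19, c20, c21] ((12 : Int)) ' ' = c12 := rfl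
    have hg14 : PySem.List.pyGetD [c0, c1, c2, c3, c4, c5, c6, c7, c8, c9, c10, c11, c12, c13, c14, c15, c16, c17, c18, c19, c20, c21] ((14 : Int)) ' ' = c14 := rfl
    have hg16 : PySem.List.pyGetD [c0, c1, c2, c3, c4, c5, c6, c7, c8, c9, c10, c11, c12, c13, c14, c15, c16, c17, c18, c19, c20, c21] ((16 : Int)) ' ' = c16 := rfl
    have hg18 : PySem.List.pyGetD [c0, c1, c2, c3, c4, c5, c6, c7, c8, c9, c10, c11, c12, c13, c14, c15, c16, c17, c18, c19, c20, c21] ((18 : Int)) ' ' = c18 := rfl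
    have hg20 : PySem.List.pyGetD [c0, c1, c2, c3, c4, c5, c6, c7, c8, c9, c10, c11, c12, c13, c14, c15, c16, c17, c18, c19, c20, c21] ((20 : Int)) ' ' = c20 := rfl
    have hh2 : PySem.List.pyGetD [c0, c1, c2, c3, c4, c5, c6, c7, c8, c9, c10, c11, c12, c13, c14, c15, c16, c17, c18, c19, c20, c21] ((2 : Int) + 1) ' ' = c3 := rfl
    have hh4 : PySem.List.pyGetD [c0, c1, c2, c3, c4, c5, c6, c7, c8, c9, c10, c11, c12, c13, c14, c15, c16, c17, c18, c19, c20, c21] ((4 : Int) + 1) ' ' = c5 := rfl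
    have hh6 : PySem.List.pyGetD [c0, c1, c2, c3, c4, c5, c6, c7, c8, c9, c10, c11, c12, c13, c14, c15, c16, c17, c18, c19, c20, c21] ((6 : Int) + 1) ' ' = c7 := rfl
    have hh8 : PySem.List.pyGetD [c0, c1, c2, c3, c4, c5, c6, c7, c8, c9, c10, c11, c12, c13, c14, c15, c16, c17, c18, c19, c20, c21] ((8 : Int) + 1) ' ' = c9 := rfl
    have hh10 : PySem.List.pyGetD [c0, c1, c2, c3, c4, c5, c6, c7, c8, c9, c10, c11, c12, c13, c14, c15, c16, c17, c18, c19, c20, c21] ((10 : Int) + 1) ' ' = c11 := rfl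
    have hh12 : PySem.List.pyGetD [c0, c1, c2, c3, c4, c5, c6, c7, c8, c9, c10, c11, c12, c13, c14, c15, c16, c17, c18, c19, c20, c21] ((12 : Int) + 1) ' ' = c13 := rfl
    have hh14 : PySem.List.pyGetD [c0, c1, c2, c3, c4, c5, c6, c7, c8, c9, c10, c11, c12, c13, c14, c15, c16, c17, c18, c19, c20, c21] ((14 : Int) + 1) ' ' = c15 := rfl
    have hh16 : PySem.List.pyGetD [c0, c1, c2, c3, c4, c5, c6, c7, c8, c9, c10, c11, c12, c13, c14, c15, c16, c17, c18, c19, c20, c21] ((16 : Int) + 1) ' ' = c17 := rfl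
    have hh18 : PySem.List.pyGetD [c0, c1, c2, c3, c4, c5, c6, c7, c8, c9, c10, c11, c12, c13, c14, c15, c16, c17, c18, c19, c20, c21] ((18 : Int) + 1) ' ' = c19 := rfl
    have hh20 : PySem.List.pyGetD [c0, c1, c2, c3, c4, c5, c6, c7, c8, c9, c10, c11, c12, c13, c14, c15, c16, c17, c18, c19, c20, c21] ((20 : Int) + 1) ' ' = c21 := rfl
    simp only [decode_uuid, decode_uuid_alt, hcs, hr]
    rw [if_neg (by simp), if_neg (by simp)]
    simp only [List.foldl_cons, List.foldl_nil, hg0, hg1, hg2, hg4, hg6, hg8, hg10, hg12, hg14, hg16, hg18, hg20,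
      hh2, hh4, hh6, hh8, hh10, hh12, hh14, hh16, hh18, hh20]
    simp only [Int.reduceAdd]
    have hs2 : PySem.List.pyGetD pvSTable ((2 : Int)) 0 = 2 := rfl
    have hs3 : PySem.List.pyGetD pvSTable ((3 : Int)) 0 = 3 := rfl
    have hs4 : PySem.List.pyGetD pvSTable ((4 : Int)) 0 = 4 := rfl
    have hs5 : PySem.List.pyGetD pvSTable ((5 : Int)) 0 = 5 := rfl
    have hs6 : PySem.List.pyGetD pvSTable ((6 : Int)) 0 = 6 := rfl
    have hs7 : PySem.List.pyGetD pvSTable ((7 : Int)) 0 = 7 := rfl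
    have hs8 : PySem.List.pyGetD pvSTable ((8 : Int)) 0 = 9 := rfl
    have hs9 : PySem.List.pyGetD pvSTable ((9 : Int)) 0 = 10 := rfl
    have hs10 : PySem.List.pyGetD pvSTable ((10 : Int)) 0 = 11 := rfl
    have hs11 : PySem.List.pyGetD pvSTable ((11 : Int)) 0 = 12 := rfl
    have hs12 : PySem.List.pyGetD pvSTable ((12 : Int)) 0 = 14 := rfl
    have hs13 : PySem.List.pyGetD pvSTable ((13 : Int)) 0 = 15 := rfl
    have hs14 : PySem.List.pyGetD pvSTable ((14 : Int)) 0 = 16 := rfl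
    have hs15 : PySem.List.pyGetD pvSTable ((15 : Int)) 0 = 17 := rfl
    have hs16 : PySem.List.pyGetD pvSTable ((16 : Int)) 0 = 19 := rfl
    have hs17 : PySem.List.pyGetD pvSTable ((17 : Int)) 0 = 20 := rfl
    have hs18 : PySem.List.pyGetD pvSTable ((18 : Int)) 0 = 21 := rfl
    have hs19 : PySem.List.pyGetD pvSTable ((19 : Int)) 0 = 22 := rfl
    have hs20 : PySem.List.pyGetD pvSTable ((20 : Int)) 0 = 24 := rfl
    have hs21 : PySem.List.pyGetD pvSTable ((21 : Int)) 0 = 25 := rfl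
    have hs22 : PySem.List.pyGetD pvSTable ((22 : Int)) 0 = 26 := rfl
    have hs23 : PySem.List.pyGetD pvSTable ((23 : Int)) 0 = 27 := rfl
    have hs24 : PySem.List.pyGetD pvSTable ((24 : Int)) 0 = 28 := rfl
    have hs25 : PySem.List.pyGetD pvSTable ((25 : Int)) 0 = 29 := rfl
    have hs26 : PySem.List.pyGetD pvSTable ((26 : Int)) 0 = 30 := rfl
    have hs27 : PySem.List.pyGetD pvSTable ((27 : Int)) 0 = 31 := rfl
    have hs28 : PySem.List.pyGetD pvSTable ((28 : Int)) 0 = 32 := rfl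
    have hs29 : PySem.List.pyGetD pvSTable ((29 : Int)) 0 = 33 := rfl
    have hs30 : PySem.List.pyGetD pvSTable ((30 : Int)) 0 = 34 := rfl
    have hs31 : PySem.List.pyGetD pvSTable ((31 : Int)) 0 = 35 := rfl
    simp only [hs2, hs3, hs4, hs5, hs6, hs7, hs8, hs9, hs10, hs11, hs12, hs13, hs14, hs15, hs16, hs17, hs18, hs19, hs20, hs21, hs22, hs23, hs24, hs25, hs26, hs27, hs28, hs29, hs30, hs31]
    simp [PySem.List.pySetD_of_nonneg, PySem.List.slice_to, PySem.List.slice_from,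
      List.set, List.flatten, Int.reduceToNat, List.take, List.drop, pvTemplate,
      PySem.List.slice_toNat]
  · simp only [decode_uuid, decode_uuid_alt]
    rw [if_pos h, if_pos h]
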